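-- pv_equiv track=rewrite | github.com/manwar/perlweeklychallenge-club | challenge-273/packy-anderson/python/ch-2.py | bAfterA
-- ===== SOURCE A (Python) =====
-- def bAfterA(strVal):
--   seen_b = False
--   for c in strVal:
--     if seen_b:
--       if c == 'a':
--         return False
--     elif c == 'b':
--       seen_b = True
--   return seen_b
-- ===== SOURCE B (Python) =====
-- def bAfterA(strVal):
--     first_b = strVal.find('b')
--     return first_b != -1 and 'a' not in strVal[first_b:]
-- ===== Notes on version B (the rewrite author's own statement) =====
-- stated objective: idiomatic
-- what changed: Replaces the per-character scan with a seen_b flag and early return by two library primitives: str.find locates the first occurrence of letter b, then a not-in membership test checks the suffix from that position.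
import Mathlib
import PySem

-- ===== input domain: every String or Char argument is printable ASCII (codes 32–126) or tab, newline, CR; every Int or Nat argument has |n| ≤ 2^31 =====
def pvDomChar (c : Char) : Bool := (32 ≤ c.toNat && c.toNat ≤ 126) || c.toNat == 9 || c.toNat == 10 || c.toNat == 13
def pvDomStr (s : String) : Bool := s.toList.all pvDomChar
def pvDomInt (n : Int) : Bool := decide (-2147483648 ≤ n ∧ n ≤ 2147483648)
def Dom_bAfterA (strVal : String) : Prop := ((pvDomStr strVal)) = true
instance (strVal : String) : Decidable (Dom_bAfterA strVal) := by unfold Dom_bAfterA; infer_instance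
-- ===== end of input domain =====

-- B replaces A's per-character scan with a seen_b flag by two library calls:
-- first 'b' position via find, then an "'a' not in the suffix" test (idiomatic; same cost).


-- ===== PORT A =====
-- the for-loop over the characters with the seen_b flag; 'return False' is the early exit
def bAfterALoop : List Char → Bool → Bool
  | [], seen_b => seen_b
  | c :: cs, seen_b =>
    if seen_b then
      if c = 'a' then false else bAfterALoop cs seen_b
    else if c = 'b' then bAfterALoop cs true
    else bAfterALoop cs seen_b

def bAfterA (strVal : String) : Bool := bAfterALoop strVal.toList false

-- ===== PORT B =====
def bAfterA_alt (strVal : String) : Bool :=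
  let firstB : Int := PySem.Str.find strVal "b"
  decide (firstB ≠ -1) && !(PySem.Str.isIn "a" (PySem.Str.slice strVal (some firstB) none))

-- ===== PRECONDITION & SPEC =====
def Spec_bAfterA (strVal : String) (out : Bool) : Prop := out = bAfterA_alt strVal
instance (strVal : String) (out : Bool) : Decidable (Spec_bAfterA strVal out) := by unfold Spec_bAfterA; infer_instance

-- ===== CLAIM (what is proved, stated in full; the proofs are below) =====
def Claim_equal_bAfterA : Prop := ∀ (strVal : String), Dom_bAfterA strVal → Spec_bAfterA strVal (bAfterA strVal)

-- ===== LEMMAS AND PROOFS =====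

-- once seen_b is set, A returns true iff no 'a' remains
theorem bAfterALoop_true (cs : List Char) : bAfterALoop cs true = !(cs.contains 'a') := by
  induction cs with
  | nil => rfl
  | cons c cs ih =>
    simp only [bAfterALoop, if_true, List.contains_cons]
    by_cases h : c = 'a'
    · simp [h]
    · simp [h, ih]
      exact fun _ he => h he.symm

theorem find_singleton_cons_self (b : Char) (cs : List Char) :
    PySem.Chars.find (b :: cs) [b] = 0 := by
  have hinf : [b] <:+: b :: cs := (List.singleton_infix_iff b (b :: cs)).2 (by simp)
  have h0 : 0 ≤ PySem.Chars.find (b :: cs) [b] := (PySem.Chars.find_nonneg_iff _ _).2 hinf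
  obtain ⟨-, hmin⟩ := PySem.Chars.find_spec h0
  by_contra hne
  have hpos : 0 < (PySem.Chars.find (b :: cs) [b]).toNat := by omega
  exact hmin 0 hpos (by simp)

theorem find_singleton_cons_ne (b c : Char) (cs : List Char) (hne : c ≠ b) :
    PySem.Chars.find (c :: cs) [b] =
      if PySem.Chars.find cs [b] = -1 then -1 else PySem.Chars.find cs [b] + 1 := by
  have hpre : ¬ [b] <+: c :: cs := by
    simp [List.cons_prefix_cons]; intro h; exact (hne h.symm).elim
  by_cases hk : PySem.Chars.find cs [b] = -1
  · have hninf : ¬ [b] <:+: cs := (PySem.Chars.find_eq_neg_one_iff cs [b]).1 hk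
    have : ¬ [b] <:+: c :: cs := by
      rw [List.infix_cons_iff]; rintro (h | h); exacts [hpre h, hninf h]
    simp [hk, (PySem.Chars.find_eq_neg_one_iff _ _).2 this]
  · have hk0 : 0 ≤ PySem.Chars.find cs [b] :=
      (PySem.Chars.find_nonneg_iff _ _).2 ((PySem.Chars.find_ne_neg_one_iff _ _).1 hk)
    obtain ⟨hkP, hkMin⟩ := PySem.Chars.find_spec hk0
    have hinf : [b] <:+: c :: cs :=
      List.infix_cons (((PySem.Chars.find_ne_neg_one_iff _ _).1 hk))
    have hf0 : 0 ≤ PySem.Chars.find (c :: cs) [b] := (PySem.Chars.find_nonneg_iff _ _).2 hinf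
    obtain ⟨hfP, hfMin⟩ := PySem.Chars.find_spec hf0
    have hfpos : (PySem.Chars.find (c :: cs) [b]).toNat ≠ 0 := by
      intro h0; rw [h0] at hfP; exact hpre (by simpa using hfP)
    obtain ⟨m, hm⟩ : ∃ m, (PySem.Chars.find (c :: cs) [b]).toNat = m + 1 := by
      cases h : (PySem.Chars.find (c :: cs) [b]).toNat with
      | zero => exact absurd h hfpos
      | succ m => exact ⟨m, rfl⟩
    have hmP : [b] <+: cs.drop m := by rw [hm] at hfP; simpa using hfP
    have h1 : (PySem.Chars.find cs [b]).toNat ≤ m := by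
      by_contra hlt
      exact hkMin m (by omega) hmP
    have h2 : m ≤ (PySem.Chars.find cs [b]).toNat := by
      by_contra hlt
      exact hfMin ((PySem.Chars.find cs [b]).toNat + 1) (by omega) (by simpa using hkP)
    simp only [hk, if_false]
    omega

theorem isIn_singleton (a : Char) (xs : List Char) :
    PySem.Chars.isIn [a] xs = xs.contains a := by
  by_cases h : a ∈ xs
  · simp [(PySem.Chars.isIn_iff_infix _ _).2 ((List.singleton_infix_iff a xs).2 h), h]
  · have := (PySem.Chars.isIn_eq_false_iff [a] xs).2
      (fun hi => h ((List.singleton_infix_iff a xs).1 hi))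
    simp [this, h]

-- the main invariant: A's loop from the unset state equals B's position comparison
theorem bAfterALoop_false (cs : List Char) :
    bAfterALoop cs false =
      if PySem.Chars.find cs ['b'] = -1 then false
      else !((cs.drop (PySem.Chars.find cs ['b']).toNat).contains 'a') := by
  induction cs with
  | nil => rfl
  | cons c cs ih =>
    by_cases hb : c = 'b'
    · subst hb
      rw [show bAfterALoop ('b' :: cs) false = bAfterALoop cs true from by simp [bAfterALoop],
        bAfterALoop_true, find_singleton_cons_self]
      simp
    · have hstep : bAfterALoop (c :: cs) false = bAfterALoop cs false := by
        simp [bAfterALoop, hb]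
      rw [hstep, ih, find_singleton_cons_ne 'b' c cs hb]
      by_cases hk : PySem.Chars.find cs ['b'] = -1
      · simp [hk]
      · have hk0 : 0 ≤ PySem.Chars.find cs ['b'] :=
          (PySem.Chars.find_nonneg_iff _ _).2 ((PySem.Chars.find_ne_neg_one_iff _ _).1 hk)
        have hne1 : PySem.Chars.find cs ['b'] + 1 ≠ -1 := by omega
        have htn : (PySem.Chars.find cs ['b'] + 1).toNat = (PySem.Chars.find cs ['b']).toNat + 1 := by
          omega
        simp [hk, hne1, htn]

-- ===== VERDICT (by name: the statement is the Claim_ definition above) =====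
theorem bAfterA_spec : Claim_equal_bAfterA := by
  intro strVal _
  unfold Spec_bAfterA bAfterA
  rw [bAfterALoop_false]
  by_cases hk : PySem.Chars.find strVal.toList ['b'] = -1
  · simp [bAfterA_alt, hk]
  · have hk0 : 0 ≤ PySem.Chars.find strVal.toList ['b'] :=
      (PySem.Chars.find_nonneg_iff _ _).2 ((PySem.Chars.find_ne_neg_one_iff _ _).1 hk)
    simp [bAfterA_alt, hk]
    rw [PySem.List.slice_from _ hk0, isIn_singleton]
    simp
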